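-- pv_equiv track=rewrite | github.com/farrantch/Pipes | buildspec/generate-cicd-templates.py | generate_base_statement
-- ===== SOURCE A (Python) =====
-- def generate_base_statement(environments, purpose):
--     # Purpose - All / Deploy / Pipeline
--     base_statement = []
--     if purpose == "Pipeline" or purpose == "All":
--         base_statement.append(
--             {
--                 "Fn::Sub": "arn:aws:iam::${AWS::AccountId}:role/cicd-${MasterPipeline}-scopes-${Scope}-CodePipelineRole"
--             }
--         )
--     if purpose == "Deploy" or purpose == "All":
--         base_statement.append(
--             {
--                 "Fn::Sub": "arn:aws:iam::${AWS::AccountId}:role/cicd-${MasterPipeline}-scopes-${Scope}-CloudFormationRole"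
--             }
--         )
--         base_statement.append(
--             {
--                 "Fn::Sub": "arn:aws:iam::${AWS::AccountId}:role/cicd-${MasterPipeline}-scopes-${Scope}-CodeBuildRole"
--             }
--         )
--
--     # CICD account is not optional
--     # base_statement = [
--     #     {
--     #         "Fn::Sub": "arn:aws:iam::${AWS::AccountId}:role/cicd-${MasterPipeline}-scopes-${Scope}-CloudFormationRole"
--     #     },
--     #     {
--     #         "Fn::Sub": "arn:aws:iam::${AWS::AccountId}:role/cicd-${MasterPipeline}-scopes-${Scope}-CodePipelineRole"
--     #     },
--     #     {
--     #         "Fn::Sub": "arn:aws:iam::${AWS::AccountId}:role/cicd-${MasterPipeline}-scopes-${Scope}-CodeBuildRole"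
--     #     }
--     #]
--
--     # Loop Through SDLC Environments
--     for env, env_value in environments.items():
--         env_lower = env.lower()
--         if purpose == "Pipeline" or purpose == "All":
--             base_statement.append(
--                 {
--                     "Fn::Sub": "arn:aws:iam::" + env_value['AccountId'] + ":role/" + env_lower + "-${MasterPipeline}-scopes-${Scope}-CodePipelineRole"
--                 }
--             )
--         if purpose == "Deploy" or purpose == "All":
--             base_statement.append(
--                 {
--                     "Fn::Sub": "arn:aws:iam::" + env_value['AccountId'] + ":role/" + env_lower + "-${MasterPipeline}-scopes-${Scope}-CloudFormationRole"
--                 }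
--             )
--             base_statement.append(
--                 {
--                     "Fn::Sub": "arn:aws:iam::" + env_value['AccountId'] + ":role/" + env_lower + "-${MasterPipeline}-scopes-${Scope}-CodeBuildRole"
--                 }
--             )
--     return base_statement
-- ===== SOURCE B (Python) =====
-- def generate_base_statement(environments, purpose):
--     # one uniform pass over (account, prefix) pairs x role suffixes
--     roles = []
--     if purpose == "Pipeline" or purpose == "All":
--         roles.append("CodePipelineRole")
--     if purpose == "Deploy" or purpose == "All":
--         roles.append("CloudFormationRole")
--         roles.append("CodeBuildRole")
--     if not roles:
--         return []
--     pairs = [("${AWS::AccountId}", "cicd")]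
--     for env, env_value in environments.items():
--         pairs.append((env_value['AccountId'], env.lower()))
--     return [
--         {"Fn::Sub": "arn:aws:iam::" + account + ":role/" + prefix
--                     + "-${MasterPipeline}-scopes-${Scope}-" + role}
--         for account, prefix in pairs
--         for role in roles
--     ]
-- ===== Notes on version B (the rewrite author's own statement) =====
-- stated objective: simpler
-- what changed: Replaces the duplicated base block plus per-environment branch-and-append loop by one uniform pass: a list of (account, prefix) pairs (CICD first, then the environments) crossed with a role-suffix list, so each ARN is built by a single product comprehension.
import Mathlib
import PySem

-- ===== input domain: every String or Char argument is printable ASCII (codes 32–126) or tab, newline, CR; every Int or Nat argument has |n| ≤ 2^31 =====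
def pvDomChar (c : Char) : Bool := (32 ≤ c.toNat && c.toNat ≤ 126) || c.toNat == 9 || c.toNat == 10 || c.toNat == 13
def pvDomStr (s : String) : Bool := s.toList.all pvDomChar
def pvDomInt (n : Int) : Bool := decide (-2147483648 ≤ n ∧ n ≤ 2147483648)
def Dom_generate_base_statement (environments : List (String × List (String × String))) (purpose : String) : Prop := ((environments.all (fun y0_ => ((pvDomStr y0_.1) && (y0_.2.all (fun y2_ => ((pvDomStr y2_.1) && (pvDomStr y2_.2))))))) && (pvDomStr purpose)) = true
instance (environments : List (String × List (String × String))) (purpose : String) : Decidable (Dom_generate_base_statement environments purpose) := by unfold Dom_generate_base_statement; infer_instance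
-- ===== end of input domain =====

-- B merges the fixed CICD block and the environment loop into one (account, prefix) × role-suffix
-- product pass (objective: simpler). Proved equal to A wherever A returns (Pre_: every environment
-- value carries an "AccountId" key; otherwise A raises KeyError).

-- ===== PORT A =====
def generate_base_statement (environments : List (String × List (String × String))) (purpose : String) : List (List (String × String)) :=
  let base_statement : List (List (String × String)) := []
  let base_statement :=
    if purpose == "Pipeline" || purpose == "All" then
      base_statement ++ [[("Fn::Sub", "arn:aws:iam::${AWS::AccountId}:role/cicd-${MasterPipeline}-scopes-${Scope}-CodePipelineRole")]]
    else base_statement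
  let base_statement :=
    if purpose == "Deploy" || purpose == "All" then
      base_statement
        ++ [[("Fn::Sub", "arn:aws:iam::${AWS::AccountId}:role/cicd-${MasterPipeline}-scopes-${Scope}-CloudFormationRole")]]
        ++ [[("Fn::Sub", "arn:aws:iam::${AWS::AccountId}:role/cicd-${MasterPipeline}-scopes-${Scope}-CodeBuildRole")]]
    else base_statement
  environments.foldl (fun acc p =>
    let env_lower := PySem.Str.lower p.1
    -- env_value['AccountId']: first-match dict lookup; Pre_ guarantees the key is present
    let acct := PySem.Dict.getD (PySem.Dict.mk p.2) "AccountId" ""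
    let acc :=
      if purpose == "Pipeline" || purpose == "All" then
        acc ++ [[("Fn::Sub", "arn:aws:iam::" ++ acct ++ ":role/" ++ env_lower ++ "-${MasterPipeline}-scopes-${Scope}-CodePipelineRole")]]
      else acc
    if purpose == "Deploy" || purpose == "All" then
      acc ++ [[("Fn::Sub", "arn:aws:iam::" ++ acct ++ ":role/" ++ env_lower ++ "-${MasterPipeline}-scopes-${Scope}-CloudFormationRole")]]
          ++ [[("Fn::Sub", "arn:aws:iam::" ++ acct ++ ":role/" ++ env_lower ++ "-${MasterPipeline}-scopes-${Scope}-CodeBuildRole")]]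
    else acc) base_statement

-- ===== PORT B =====
def generate_base_statement_alt (environments : List (String × List (String × String))) (purpose : String) : List (List (String × String)) :=
  let roles : List String :=
    (if purpose == "Pipeline" || purpose == "All" then ["CodePipelineRole"] else [])
      ++ (if purpose == "Deploy" || purpose == "All" then ["CloudFormationRole", "CodeBuildRole"] else [])
  if roles.isEmpty then [] else
  let pairs : List (String × String) :=
    ("${AWS::AccountId}", "cicd")
      :: environments.map (fun p => (PySem.Dict.getD (PySem.Dict.mk p.2) "AccountId" "", PySem.Str.lower p.1))
  pairs.flatMap (fun q =>
    roles.map (fun role =>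
      [("Fn::Sub", "arn:aws:iam::" ++ q.1 ++ ":role/" ++ q.2 ++ "-${MasterPipeline}-scopes-${Scope}-" ++ role)]))

-- ===== PRECONDITION & SPEC =====
-- Pre_: when purpose selects any branch, every environment value must contain the key "AccountId";
-- on a value without it A raises KeyError (for non-matching purpose A never looks the key up).
def Pre_generate_base_statement (environments : List (String × List (String × String))) (purpose : String) : Prop :=
  (purpose == "Pipeline" || purpose == "Deploy" || purpose == "All") = true →
    ∀ p ∈ environments, (PySem.Dict.contains (PySem.Dict.mk p.2) "AccountId") = true
instance (environments : List (String × List (String × String))) (purpose : String) : Decidable (Pre_generate_base_statement environments purpose) := by unfold Pre_generate_base_statement; infer_instance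
def pvWitness_generate_base_statement : (List (String × List (String × String))) × String :=
  ([("Dev", [("AccountId", "111122223333")])], "All")

def Spec_generate_base_statement (environments : List (String × List (String × String))) (purpose : String) (out : List (List (String × String))) : Prop := out = generate_base_statement_alt environments purpose
instance (environments : List (String × List (String × String))) (purpose : String) (out : List (List (String × String))) : Decidable (Spec_generate_base_statement environments purpose out) := by unfold Spec_generate_base_statement; infer_instance

-- ===== CLAIM (what is proved, stated in full; the proofs are below) =====
def Claim_equal_generate_base_statement : Prop := ∀ (environments : List (String × List (String × String))) (purpose : String), Dom_generate_base_statement environments purpose → Pre_generate_base_statement environments purpose → Spec_generate_base_statement environments purpose (generate_base_statement environments purpose)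

-- ===== LEMMAS AND PROOFS =====

-- A's single-literal role suffix equals B's "-…-" ++ role concatenation.
theorem pvStrMerge (a e r s : String) (h : "-${MasterPipeline}-scopes-${Scope}-" ++ r = s) :
    "arn:aws:iam::" ++ a ++ ":role/" ++ e ++ "-${MasterPipeline}-scopes-${Scope}-" ++ r
      = "arn:aws:iam::" ++ a ++ ":role/" ++ e ++ s := by
  rw [String.append_assoc, h]

-- ===== VERDICT (by name: the statement is the Claim_ definition above) =====
theorem generate_base_statement_spec : Claim_equal_generate_base_statement := by
  intro envs purpose _ _
  show generate_base_statement envs purpose = generate_base_statement_alt envs purpose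
  unfold generate_base_statement generate_base_statement_alt
  by_cases h1 : (purpose == "Pipeline" || purpose == "All") = true <;>
    by_cases h2 : (purpose == "Deploy" || purpose == "All") = true <;>
      simp only [h1, h2, if_true, if_false, Bool.false_eq_true, List.nil_append,
        List.append_assoc, List.append_nil, List.flatMap_cons, List.map_cons,
        List.map_nil, List.flatMap_map] <;>
      first
        | (rw [PySem.List.foldl_append_eq_flatMap]
           refine congrArg₂ _ (by rfl) (List.flatMap_congr ?_)
           intro p _
           simp [pvStrMerge _ _ _ _ rfl])
        | simp
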